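-- pv_equiv track=rewrite | github.com/marangiol/Esame_Python | FUNZIONI.py | trovanomi
-- ===== SOURCE A (Python) =====
-- def trovanomi (data):
--     """
--     Questa funzione associa ogni utente un numero
--     """
--     user_id = {}
--
--     identific_unico = 1
--     for campo in data:
--             nome= campo[1]
--             if nome not in user_id:
--                 user_id[nome]=identific_unico
--                 identific_unico += 1
--     return user_id, identific_unico
-- ===== SOURCE B (Python) =====
-- def trovanomi(data):
--     """
--     Questa funzione associa ogni utente un numero
--     """
--     names = [campo[1] for campo in data]
--     order = sorted(set(names), key=names.index)
--     user_id = dict(zip(order, range(1, len(order) + 1)))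
--     return user_id, len(order) + 1
-- ===== Notes on version B (the rewrite author's own statement) =====
-- stated objective: alternative
-- what changed: Replaced A's single incremental dict-plus-counter pass by a rank-by-sort algorithm: take set(names), sort it by first-occurrence index (key=names.index), and pair the sorted names with range(1, n+1); the counter disappears entirely and ids arise as sort ranks.
import Mathlib
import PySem

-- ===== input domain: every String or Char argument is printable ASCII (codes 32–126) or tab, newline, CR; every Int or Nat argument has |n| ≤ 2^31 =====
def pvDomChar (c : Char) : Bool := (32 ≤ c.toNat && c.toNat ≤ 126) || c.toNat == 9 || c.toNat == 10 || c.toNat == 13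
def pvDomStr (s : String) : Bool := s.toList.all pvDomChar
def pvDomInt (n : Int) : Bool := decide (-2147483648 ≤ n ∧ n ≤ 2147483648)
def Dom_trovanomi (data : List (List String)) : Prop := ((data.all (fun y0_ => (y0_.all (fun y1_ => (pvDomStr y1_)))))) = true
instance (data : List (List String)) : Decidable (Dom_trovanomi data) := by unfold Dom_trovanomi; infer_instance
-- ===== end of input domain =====

-- B replaces A's single incremental dict-plus-counter pass by a rank-by-sort algorithm:
-- sort the SET of names by first-occurrence index (names.index) and pair with range(1, n+1) (alternative; same result).

-- ===== PORT A =====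
def trovanomi (data : List (List String)) : (List (String × Int)) × Int :=
  let st := data.foldl
    (fun (st : PySem.Dict String Int × Int) campo =>
      let nome := PySem.List.pyGetD campo 1 ""
      if st.1.contains nome then st else (st.1.insert nome st.2, st.2 + 1))
    (PySem.Dict.empty, 1)
  (st.1.items, st.2)

-- ===== PORT B =====
-- names.index(nome) is ported as (index? names nome).getD 0; the sort key is only applied to
-- members of set(names), which all occur in names, so Python's ValueError branch is never reached
-- (and the key is injective there, so the set's iteration order cannot influence the sorted result).
def trovanomi_alt (data : List (List String)) : (List (String × Int)) × Int :=
  let names := data.map (fun campo => PySem.List.pyGetD campo 1 "")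
  let order := PySem.List.sorted (PySem.Set.ofList names)
    (fun nome => ((PySem.List.index? names nome).getD 0 : Nat)) false
  let user_id := order.zip (PySem.List.pyRange 1 ((order.length : Int) + 1) 1)
  (user_id, (order.length : Int) + 1)

-- ===== PRECONDITION & SPEC =====
-- Pre_ excludes exactly the inputs where A raises IndexError: a row with fewer than two fields.
def Pre_trovanomi (data : List (List String)) : Prop := ∀ campo ∈ data, 2 ≤ campo.length
instance (data : List (List String)) : Decidable (Pre_trovanomi data) := by unfold Pre_trovanomi; infer_instance
def pvWitness_trovanomi : List (List String) := [["1", "anna"], ["2", "bob"], ["3", "anna"]]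
def Spec_trovanomi (data : List (List String)) (out : (List (String × Int)) × Int) : Prop := out = trovanomi_alt data
instance (data : List (List String)) (out : (List (String × Int)) × Int) : Decidable (Spec_trovanomi data out) := by unfold Spec_trovanomi; infer_instance

-- ===== CLAIM (what is proved, stated in full; the proofs are below) =====
def Claim_equal_trovanomi : Prop := ∀ (data : List (List String)), Dom_trovanomi data → Pre_trovanomi data → Spec_trovanomi data (trovanomi data)

-- ===== LEMMAS AND PROOFS =====

theorem enumerate_append' {α : Type} (a b : List α) (s : Int) :
    PySem.List.enumerate (a ++ b) s
      = PySem.List.enumerate a s ++ PySem.List.enumerate b (s + a.length) := by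
  induction a generalizing s with
  | nil => simp [PySem.List.enumerate_nil]
  | cons x t ih =>
      simp only [List.cons_append, PySem.List.enumerate_cons, ih, List.length_cons]
      congr 3
      omega

-- zip with range(s, s+len) is the swapped enumerate-from-s.
theorem zip_pyRange_eq_enumerate {α : Type} (l : List α) (s : Int) :
    l.zip (PySem.List.pyRange s (s + l.length) 1)
      = (PySem.List.enumerate l s).map (fun p => (p.2, p.1)) := by
  induction l generalizing s with
  | nil => simp [PySem.List.enumerate_nil, PySem.List.pyRange_one_eq_nil]
  | cons x t ih =>
      have h : s < s + ((x :: t).length : Int) := by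
        simp only [List.length_cons]; push_cast; omega
      rw [PySem.List.pyRange_one_cons h]
      have hlen : s + ((x :: t).length : Int) = (s + 1) + (t.length : Int) := by
        simp only [List.length_cons]; push_cast; omega
      rw [hlen]
      simp only [List.zip_cons_cons, PySem.List.enumerate_cons, List.map_cons, ih (s + 1)]

-- Specialisation to range(1, len+1).
theorem zip_range1 {α : Type} (l : List α) :
    l.zip (PySem.List.pyRange 1 ((l.length : Int) + 1) 1)
      = (PySem.List.enumerate l 1).map (fun p => (p.2, p.1)) := by
  rw [show ((l.length : Int) + 1) = 1 + (l.length : Int) by ring]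
  exact zip_pyRange_eq_enumerate l 1

-- First-occurrence index of a, ported total (a always a member where used).
def idxIn (xs : List String) (a : String) : Nat := (PySem.List.index? xs a).getD 0

theorem idxIn_lt_length (xs : List String) (a : String) (ha : a ∈ xs) :
    idxIn xs a < xs.length := by
  have hs : (PySem.List.index? xs a).isSome := (PySem.List.index?_isSome_iff xs a).mpr ha
  obtain ⟨k, hk⟩ := Option.isSome_iff_exists.mp hs
  obtain ⟨hlt, -, -⟩ := PySem.List.getElem_of_index?_eq_some hk
  simp only [idxIn, hk, Option.getD_some]
  exact hlt

-- The dedup list (first occurrences in order) is strictly increasing in first-occurrence index.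
theorem dedup_pairwise_idx (xs : List String) :
    (PySem.List.dedup xs).Pairwise (fun a b => idxIn xs a < idxIn xs b) := by
  induction xs using List.reverseRecOn with
  | nil => simp [PySem.List.dedup]
  | append_singleton l x ih =>
      have hded : PySem.List.dedup (l ++ [x]) = PySem.Set.add (PySem.List.dedup l) x := by
        simp only [PySem.List.dedup_eq_ofList, PySem.Set.ofList_eq_foldl, List.foldl_append,
          List.foldl_cons, List.foldl_nil]
      rw [hded]
      by_cases hx : x ∈ l
      · have hmem : PySem.Set.contains (PySem.List.dedup l) x = true := by
          simp [PySem.Set.contains]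
          exact hx
        rw [show PySem.Set.add (PySem.List.dedup l) x = PySem.List.dedup l by
          simp only [PySem.Set.add, hmem, if_true]]
        refine ih.imp_of_mem ?_
        intro a b ha hb hab
        have ha' : a ∈ l := (PySem.List.mem_dedup l a).mp ha
        have hb' : b ∈ l := (PySem.List.mem_dedup l b).mp hb
        simp only [idxIn, PySem.List.index?_append_of_mem _ ha',
          PySem.List.index?_append_of_mem _ hb']
        exact hab
      · have hmem : PySem.Set.contains (PySem.List.dedup l) x = false := by
          simp [PySem.Set.contains]
          exact hx
        rw [show PySem.Set.add (PySem.List.dedup l) x = PySem.List.dedup l ++ [x] by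
          simp only [PySem.Set.add, hmem, Bool.false_eq_true, if_false]]
        rw [List.pairwise_append]
        refine ⟨?_, List.pairwise_singleton _ _, ?_⟩
        · refine ih.imp_of_mem ?_
          intro a b ha hb hab
          have ha' : a ∈ l := (PySem.List.mem_dedup l a).mp ha
          have hb' : b ∈ l := (PySem.List.mem_dedup l b).mp hb
          simp only [idxIn, PySem.List.index?_append_of_mem _ ha',
            PySem.List.index?_append_of_mem _ hb']
          exact hab
        · intro a ha b hb
          rcases List.mem_singleton.mp hb with rfl
          have ha' : a ∈ l := (PySem.List.mem_dedup l a).mp ha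
          have h1 : idxIn (l ++ [b]) a = idxIn l a := by
            simp only [idxIn, PySem.List.index?_append_of_mem _ ha']
          have h2 : idxIn (l ++ [b]) b = l.length := by
            simp only [idxIn, PySem.List.index?_append_singleton_self l b hx, Option.getD_some]
          rw [h1, h2]
          exact idxIn_lt_length l a ha'

-- B's sort collapses: the set of names is already in strictly increasing first-index order.
theorem sorted_ofList_idx (names : List String) :
    PySem.List.sorted (PySem.Set.ofList names)
      (fun nome => ((PySem.List.index? names nome).getD 0 : Nat)) false
    = PySem.List.dedup names := by
  refine PySem.List.sorted_eq_of_perm_of_pairwise_lt _ _ _ ?_ ?_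
  · simp [PySem.List.dedup_eq_ofList]
  · exact dedup_pairwise_idx names

-- Loop invariant for A's fold: if the dict's items already pair each key with its
-- 1-based first-seen position, the fold extends that to the new names.
theorem loop_inv (l : List String) (d : PySem.Dict String Int)
    (hnod : d.keys.Nodup)
    (hinv : d.items = (PySem.List.enumerate d.keys 1).map (fun p => (p.2, p.1))) :
    l.foldl
      (fun (st : PySem.Dict String Int × Int) nome =>
        if st.1.contains nome then st else (st.1.insert nome st.2, st.2 + 1))
      (d, (d.keys.length : Int) + 1)
    = (⟨(PySem.List.enumerate (PySem.Set.update d.keys l) 1).map (fun p => (p.2, p.1))⟩,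
       ((PySem.Set.update d.keys l).length : Int) + 1) := by
  induction l generalizing d with
  | nil =>
      simp only [List.foldl_nil, PySem.Set.update, ← hinv]
  | cons x t ih =>
      simp only [List.foldl_cons]
      by_cases hx : d.contains x = true
      · have hmem : x ∈ d.keys := (PySem.Dict.contains_iff_mem_keys d x).mp hx
        have hadd : PySem.Set.add d.keys x = d.keys := by
          simp [PySem.Set.add, PySem.Set.contains, hmem]
        rw [if_pos hx]
        have := ih d hnod hinv
        simpa [PySem.Set.update, hadd] using this
      · rw [if_neg hx]
        set d' := d.insert x ((d.keys.length : Int) + 1) with hd'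
        have hitems : d'.items = d.items ++ [(x, (d.keys.length : Int) + 1)] :=
          PySem.Dict.items_insert_of_not_contains d _ (by simpa using hx)
        have hkeys : d'.keys = d.keys ++ [x] := by
          simp [PySem.Dict.keys, hitems]
        have hnod' : d'.keys.Nodup := by
          rw [hkeys]
          refine List.Nodup.append hnod (List.nodup_singleton x) ?_
          intro a ha hb
          rcases List.mem_singleton.mp hb with rfl
          exact hx ((PySem.Dict.contains_iff_mem_keys d a).mpr ha)
        have hinv' : d'.items = (PySem.List.enumerate d'.keys 1).map (fun p => (p.2, p.1)) := by
          rw [hitems, hkeys, enumerate_append', hinv]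
          simp [PySem.List.enumerate_cons, PySem.List.enumerate_nil, add_comm]
        have hlen : ((d'.keys.length : Int) + 1) = (d.keys.length : Int) + 1 + 1 := by
          rw [hkeys]; push_cast [List.length_append, List.length_singleton]; ring
        have := ih d' hnod' hinv'
        rw [hlen] at this
        have hupd : PySem.Set.update d.keys (x :: t) = PySem.Set.update d'.keys t := by
          have hxk : x ∉ d.keys := fun h => hx ((PySem.Dict.contains_iff_mem_keys d x).mpr h)
          have : PySem.Set.add d.keys x = d.keys ++ [x] := by
            simp [PySem.Set.add, PySem.Set.contains, hxk]
          simp [PySem.Set.update, this, hkeys]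
        rw [hupd]
        exact this

-- ===== VERDICT (by name: the statement is the Claim_ definition above) =====
theorem trovanomi_spec : Claim_equal_trovanomi := by
  intro data _ _
  unfold Spec_trovanomi trovanomi trovanomi_alt
  rw [← List.foldl_map (f := fun campo => PySem.List.pyGetD campo 1 "")
        (g := fun (st : PySem.Dict String Int × Int) nome =>
          if st.1.contains nome then st else (st.1.insert nome st.2, st.2 + 1))]
  have h0 := loop_inv (data.map (fun campo => PySem.List.pyGetD campo 1 ""))
      (PySem.Dict.empty) (by simp)
      (by simp [PySem.Dict.empty, PySem.List.enumerate_nil])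
  simp only [PySem.Dict.keys_empty, List.length_nil, Nat.cast_zero, zero_add] at h0
  rw [h0]
  have heq : PySem.Set.update ([] : List String)
      (data.map (fun campo => PySem.List.pyGetD campo 1 ""))
      = PySem.List.dedup (data.map (fun campo => PySem.List.pyGetD campo 1 "")) := by
    simp [PySem.Set.update, PySem.Set.ofList_eq_foldl]
  simp only [sorted_ofList_idx, zip_range1, heq]
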